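-- pv_equiv track=rewrite | github.com/Ray-Nox/Tools | tools.py | cidr2bin32
-- ===== SOURCE A (Python) =====
-- def cidr2bin32(n: int):
--     res = []
--     for i in range(32):
--         if i < n:
--             res.append(1)
--         else:
--             res.append(0)
--     return res
-- ===== SOURCE B (Python) =====
-- def cidr2bin32(n: int):
--     # Build the 32-bit network mask as one integer, then peel its bits
--     # LSB-first and reverse — no per-element comparison against n.
--     k = max(0, min(n, 32))
--     mask = (1 << 32) - (1 << (32 - k))
--     res = []
--     for _ in range(32):
--         res.append(mask & 1)
--         mask >>= 1
--     res.reverse()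
--     return res
-- ===== Notes on version B (the rewrite author's own statement) =====
-- stated objective: alternative
-- what changed: Instead of comparing each index against n, B computes the 32-bit mask as a single integer (1<<32)-(1<<(32-k)) with the prefix length clamped between zero and thirty-two and extracts its bits LSB-first, reversing at the end.
import Mathlib
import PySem

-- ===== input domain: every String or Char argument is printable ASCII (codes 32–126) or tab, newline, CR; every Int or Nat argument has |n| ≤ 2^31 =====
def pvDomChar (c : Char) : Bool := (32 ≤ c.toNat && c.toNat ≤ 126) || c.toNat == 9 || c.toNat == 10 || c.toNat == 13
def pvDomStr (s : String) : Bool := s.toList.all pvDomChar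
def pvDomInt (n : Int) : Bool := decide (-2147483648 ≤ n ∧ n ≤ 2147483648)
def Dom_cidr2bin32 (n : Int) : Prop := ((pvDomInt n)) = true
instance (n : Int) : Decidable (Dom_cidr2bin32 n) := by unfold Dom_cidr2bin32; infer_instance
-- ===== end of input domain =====

-- B builds the mask as one integer and peels its bits instead of comparing each index to n (objective: alternative).

-- ===== PORT A =====
def cidr2bin32 (n : Int) : List Int :=
  (PySem.List.pyRange 0 32 1).foldl (fun res i => res ++ [if i < n then 1 else 0]) []

-- ===== PORT B =====
-- (32 - k).toNat is exact here: k ≤ 32 by construction, so 32 - k ≥ 0.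
def cidr2bin32_alt (n : Int) : List Int :=
  let k := max 0 (min n 32)
  let mask : Int := 2 ^ (32 : Nat) - 2 ^ (32 - k).toNat
  let st := (PySem.List.pyRange 0 32 1).foldl
    (fun (p : List Int × Int) _ => (p.1 ++ [PySem.Int.mod p.2 2], PySem.Int.floordiv p.2 2))
    ([], mask)
  st.1.reverse

-- ===== PRECONDITION & SPEC =====
def Spec_cidr2bin32 (n : Int) (out : List Int) : Prop := out = cidr2bin32_alt n
instance (n : Int) (out : List Int) : Decidable (Spec_cidr2bin32 n out) := by unfold Spec_cidr2bin32; infer_instance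

-- ===== CLAIM =====
def Claim_equal_cidr2bin32 : Prop := ∀ (n : Int), Dom_cidr2bin32 n → Spec_cidr2bin32 n (cidr2bin32 n)

-- ===== LEMMAS AND PROOFS =====

lemma pv_A_clamp (n m : Int) (h : ∀ i ∈ PySem.List.pyRange 0 32 1, (i < n ↔ i < m)) :
    cidr2bin32 n = cidr2bin32 m := by
  unfold cidr2bin32
  apply PySem.List.foldl_congr_mem
  intro acc i hi
  have := h i hi
  by_cases hc : i < n
  · rw [if_pos hc, if_pos (this.mp hc)]
  · rw [if_neg hc, if_neg (fun hm => hc (this.mpr hm))]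

lemma pv_B_clamp (n m : Int) (h : max 0 (min n 32) = max 0 (min m 32)) :
    cidr2bin32_alt n = cidr2bin32_alt m := by
  unfold cidr2bin32_alt
  rw [h]

lemma pv_mem32 : ∀ i ∈ PySem.List.pyRange 0 32 1, 0 ≤ i ∧ i < 32 := by decide

-- ===== VERDICT =====
theorem cidr2bin32_spec : Claim_equal_cidr2bin32 := by
  intro n _
  unfold Spec_cidr2bin32
  by_cases h0 : n ≤ 0
  · rw [pv_A_clamp n 0 (by intro i hi; have := pv_mem32 i hi; constructor <;> omega),
      pv_B_clamp n 0 (by omega)]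
    decide
  · by_cases h32 : 32 ≤ n
    · rw [pv_A_clamp n 32 (by intro i hi; have := pv_mem32 i hi; constructor <;> omega),
        pv_B_clamp n 32 (by omega)]
      decide
    · have h1 : 0 ≤ n := by omega
      have h2 : n ≤ 32 := by omega
      interval_cases n <;> decide
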